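-- pv_equiv track=rewrite | github.com/CryAndRRich/npmod | models/unsupervised/clustering/grid_based/gridclus.py | _get_neighbor_offsets
-- ===== SOURCE A (Python) =====
-- from typing import List, Optional, Tuple
--
-- def _get_neighbor_offsets(d: int,
--                           moore: bool = True) -> List[Tuple[int, ...]]:
--     """Return neighbor offsets for d-dim grid"""
--     if moore:
--         ranges = [(-1, 0, 1)] * d
--         offs = []
--         from itertools import product
--         for comb in product(*ranges):
--             if all(v == 0 for v in comb):
--                 continue
--             offs.append(tuple(comb))
--         return offs
--     else:
--         offs = []
--         for axis in range(d):
--             v = [0] * d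
--             v[axis] = 1
--             offs.append(tuple(v))
--             v2 = [0] * d
--             v2[axis] = -1
--             offs.append(tuple(v2))
--         return offs
-- ===== SOURCE B (Python) =====
-- from typing import List, Tuple
--
-- def _get_neighbor_offsets(d: int,
--                           moore: bool = True) -> List[Tuple[int, ...]]:
--     """Return neighbor offsets for d-dim grid"""
--     if moore:
--         # dynamic programming over the dimension: 'full' holds every tuple of the
--         # current length, 'must' those with at least one nonzero entry; the all-zero
--         # tuple is never constructed and never filtered out.
--         full: List[Tuple[int, ...]] = [()]
--         must: List[Tuple[int, ...]] = []
--         for _ in range(d):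
--             full, must = (
--                 [(v,) + t for v in (-1, 0, 1) for t in full],
--                 [(-1,) + t for t in full]
--                 + [(0,) + t for t in must]
--                 + [(1,) + t for t in full],
--             )
--         return must
--     return [(0,) * axis + (s,) + (0,) * (d - axis - 1)
--             for axis in range(d) for s in (1, -1)]
-- ===== Notes on version B (the rewrite author's own statement) =====
-- stated objective: alternative
-- what changed: The Moore branch replaces itertools.product plus an all-zero filter by a bottom-up dynamic program that grows two lists per dimension ('all tuples' and 'tuples with some nonzero entry') by prefixing -1/0/1, so the zero tuple is never constructed or filtered; the von Neumann branch builds each unit vector by tuple concatenation instead of mutating a zero list.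
import Mathlib
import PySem

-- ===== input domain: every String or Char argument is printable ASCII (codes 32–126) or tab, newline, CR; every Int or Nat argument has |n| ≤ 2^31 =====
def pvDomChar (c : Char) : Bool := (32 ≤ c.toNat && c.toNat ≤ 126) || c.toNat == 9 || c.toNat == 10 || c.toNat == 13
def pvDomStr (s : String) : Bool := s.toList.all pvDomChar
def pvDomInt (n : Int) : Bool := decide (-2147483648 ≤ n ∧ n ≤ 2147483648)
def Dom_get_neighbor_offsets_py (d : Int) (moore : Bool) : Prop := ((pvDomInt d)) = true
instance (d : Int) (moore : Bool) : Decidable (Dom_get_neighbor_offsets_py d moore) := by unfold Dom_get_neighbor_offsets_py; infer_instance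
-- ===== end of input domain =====

-- B replaces itertools.product + all-zero filter by a per-dimension dynamic program that never builds the zero tuple (alternative algorithm, same cost).

-- ===== PORT A =====
-- itertools.product(*([(-1,0,1)]*d)): first factor varies slowest
def pvProd3 : Nat → List (List Int)
  | 0 => [[]]
  | n + 1 => ([-1, 0, 1] : List Int).flatMap (fun v => (pvProd3 n).map (fun comb => v :: comb))

def get_neighbor_offsets_py (d : Int) (moore : Bool) : List (List Int) :=
  if moore then
    (pvProd3 d.toNat).foldl
      (fun offs comb => if comb.all (fun v => v == 0) then offs else offs ++ [comb]) []
  else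
    (List.range d.toNat).foldl
      (fun offs axis =>
        (offs ++ [(List.replicate d.toNat (0 : Int)).set axis 1]) ++
          [(List.replicate d.toNat (0 : Int)).set axis (-1)]) []

-- ===== PORT B =====
def get_neighbor_offsets_py_alt (d : Int) (moore : Bool) : List (List Int) :=
  if moore then
    ((List.range d.toNat).foldl
      (fun (fm : List (List Int) × List (List Int)) _ =>
        (([-1, 0, 1] : List Int).flatMap (fun v => fm.1.map (fun t => v :: t)),
         fm.1.map (fun t => (-1 : Int) :: t) ++ fm.2.map (fun t => (0 : Int) :: t)
           ++ fm.1.map (fun t => (1 : Int) :: t)))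
      ([[]], [])).2
  else
    (List.range d.toNat).flatMap (fun axis =>
      ([1, -1] : List Int).map (fun s =>
        List.replicate axis (0 : Int) ++ s :: List.replicate (d.toNat - axis - 1) (0 : Int)))

-- ===== PRECONDITION & SPEC =====
def Spec_get_neighbor_offsets_py (d : Int) (moore : Bool) (out : List (List Int)) : Prop := out = get_neighbor_offsets_py_alt d moore
instance (d : Int) (moore : Bool) (out : List (List Int)) : Decidable (Spec_get_neighbor_offsets_py d moore out) := by unfold Spec_get_neighbor_offsets_py; infer_instance

-- ===== CLAIM (what is proved, stated in full; the proofs are below) =====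
def Claim_equal_get_neighbor_offsets_py : Prop := ∀ (d : Int) (moore : Bool), Dom_get_neighbor_offsets_py d moore → Spec_get_neighbor_offsets_py d moore (get_neighbor_offsets_py d moore)

-- ===== LEMMAS AND PROOFS =====

theorem pv_foldl_skip_append {α β : Type} (q : α → Prop) [DecidablePred q] (f : α → β) :
    ∀ (l : List α) (init : List β),
      l.foldl (fun acc x => if q x then acc else acc ++ [f x]) init
        = init ++ (l.filter (fun x => !decide (q x))).map f := by
  intro l
  induction l with
  | nil => simp
  | cons a t ih =>
    intro init
    by_cases h : q a <;> simp [List.foldl_cons, h, ih]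

theorem pv_foldl_append_pair {α β : Type} (f g : α → β) :
    ∀ (l : List α) (init : List β),
      l.foldl (fun acc x => (acc ++ [f x]) ++ [g x]) init
        = init ++ l.flatMap (fun x => [f x, g x]) := by
  intro l
  induction l with
  | nil => simp
  | cons a t ih =>
    intro init
    rw [List.foldl_cons, ih]
    simp

theorem pv_flatMap_congr {α β : Type} {l : List α} {f g : α → List β}
    (h : ∀ a ∈ l, f a = g a) : l.flatMap f = l.flatMap g := by
  induction l with
  | nil => rfl
  | cons a t ih =>
    simp only [List.flatMap_cons]
    rw [h a (by simp), ih (fun x hx => h x (by simp [hx]))]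

-- filtering the (k+1)-dim product splits into the three prefix blocks of B's DP step
theorem pv_filter_succ (k : Nat) :
    (pvProd3 (k + 1)).filter (fun c => !(c.all fun v => v == 0))
      = (pvProd3 k).map (fun t => (-1 : Int) :: t)
          ++ ((pvProd3 k).filter (fun c => !(c.all fun v => v == 0))).map (fun t => (0 : Int) :: t)
          ++ (pvProd3 k).map (fun t => (1 : Int) :: t) := by
  simp only [pvProd3, List.flatMap_cons, List.flatMap_nil, List.append_nil,
    List.filter_append, List.filter_map, Function.comp_def]
  simp [List.all_cons]

-- B's loop invariant: after k steps the state is (product, filtered product)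
theorem pv_fold_inv (k : Nat) :
    (List.range k).foldl
      (fun (fm : List (List Int) × List (List Int)) _ =>
        (([-1, 0, 1] : List Int).flatMap (fun v => fm.1.map (fun t => v :: t)),
         fm.1.map (fun t => (-1 : Int) :: t) ++ fm.2.map (fun t => (0 : Int) :: t)
           ++ fm.1.map (fun t => (1 : Int) :: t)))
      ([[]], [])
    = (pvProd3 k, (pvProd3 k).filter (fun c => !(c.all fun v => v == 0))) := by
  induction k with
  | zero => simp [pvProd3]
  | succ k ih =>
    rw [List.range_succ, List.foldl_append, ih]
    simp only [List.foldl_cons, List.foldl_nil]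
    rw [← pv_filter_succ]
    rfl

-- a unit vector by set-on-replicate equals B's concatenation of replicates
theorem pv_set_repl (s : Int) :
    ∀ (n axis : Nat), axis < n →
      (List.replicate n (0 : Int)).set axis s
        = List.replicate axis (0 : Int) ++ s :: List.replicate (n - axis - 1) (0 : Int) := by
  intro n
  induction n with
  | zero => intro axis h; omega
  | succ n ih =>
    intro axis h
    cases axis with
    | zero => simp [List.replicate_succ]
    | succ a =>
      have ha : a < n := by omega
      simp [List.replicate_succ, List.set_cons_succ, ih a ha]

-- ===== VERDICT (by name: the statement is the Claim_ definition above) =====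
theorem get_neighbor_offsets_py_spec : Claim_equal_get_neighbor_offsets_py := by
  intro d moore _
  unfold Spec_get_neighbor_offsets_py
  cases moore with
  | true =>
    simp only [get_neighbor_offsets_py, get_neighbor_offsets_py_alt, if_true]
    rw [pv_foldl_skip_append (q := fun comb : List Int => (comb.all fun v => v == 0) = true),
      pv_fold_inv]
    simp only [List.nil_append, List.map_id_fun']
    apply List.filter_congr
    intro c _
    rw [Bool.eq_iff_iff]
    simp [List.all_eq_true]
  | false =>
    simp only [get_neighbor_offsets_py, get_neighbor_offsets_py_alt,
      Bool.false_eq_true, if_false]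
    rw [pv_foldl_append_pair]
    simp only [List.nil_append]
    apply pv_flatMap_congr
    intro axis haxis
    have h : axis < d.toNat := List.mem_range.mp haxis
    simp [pv_set_repl 1 d.toNat axis h, pv_set_repl (-1) d.toNat axis h]
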